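-- pv_equiv track=rewrite | github.com/JanakKC/pycharmproject | Revision/add.py | word_from_letter
-- ===== SOURCE A (Python) =====
-- def word_from_letter(letters, words):
--     count = 0
--     for i in letters:
--         if i in words:
--             if (letters.count(i) == words.count(i)):
--                 count += 1
--         else:
--             count -= 1
--     if count == len(letters):
--         x = True
--     else:
--         x = False
--     return x
-- ===== SOURCE B (Python) =====
-- def word_from_letter(letters, words):
--     letter_counts = {}
--     for c in letters:
--         letter_counts[c] = letter_counts.get(c, 0) + 1
--     word_counts = {}
--     for c in words:
--         word_counts[c] = word_counts.get(c, 0) + 1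
--     return all(letter_counts[c] == word_counts.get(c, 0) for c in letter_counts)
-- ===== Notes on version B (the rewrite author's own statement) =====
-- stated objective: faster
-- what changed: B tabulates character counts of both strings once into dicts and compares them over the distinct letters, replacing A's per-character rescans (.count and 'in' inside the loop) and its +/-1 accumulator decoded by count==len(letters).
import Mathlib
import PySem

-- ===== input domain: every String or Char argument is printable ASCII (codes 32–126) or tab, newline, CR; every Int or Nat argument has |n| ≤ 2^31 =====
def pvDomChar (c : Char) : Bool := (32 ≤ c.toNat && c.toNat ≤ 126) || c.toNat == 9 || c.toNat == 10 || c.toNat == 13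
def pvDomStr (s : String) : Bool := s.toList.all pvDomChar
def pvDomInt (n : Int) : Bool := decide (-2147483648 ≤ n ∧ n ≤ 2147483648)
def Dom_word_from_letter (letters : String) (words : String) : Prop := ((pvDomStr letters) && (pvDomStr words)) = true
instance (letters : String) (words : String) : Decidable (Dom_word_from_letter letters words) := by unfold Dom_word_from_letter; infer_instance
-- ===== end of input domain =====

-- B replaces A's per-character rescans with two count tables built once and compared over the distinct letters (faster).

-- ===== PORT A =====
-- 'i in words' / '.count(i)' for the single character i are exact as char membership / char count.
def word_from_letter (letters : String) (words : String) : Bool :=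
  let count : Int := letters.toList.foldl (fun (count : Int) i =>
    if words.toList.contains i then
      if letters.toList.count i == words.toList.count i then count + 1 else count
    else count - 1) 0
  if count == PySem.Str.len letters then true else false

-- ===== PORT B =====
def word_from_letter_alt (letters : String) (words : String) : Bool :=
  let letterCounts : PySem.Dict Char Int :=
    letters.toList.foldl (fun d c => d.insert c (d.getD c 0 + 1)) PySem.Dict.empty
  let wordCounts : PySem.Dict Char Int :=
    words.toList.foldl (fun d c => d.insert c (d.getD c 0 + 1)) PySem.Dict.empty
  letterCounts.keys.all (fun c => letterCounts.getD c 0 == wordCounts.getD c 0)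

-- ===== PRECONDITION & SPEC =====
def Spec_word_from_letter (letters : String) (words : String) (out : Bool) : Prop := out = word_from_letter_alt letters words
instance (letters : String) (words : String) (out : Bool) : Decidable (Spec_word_from_letter letters words out) := by unfold Spec_word_from_letter; infer_instance

-- ===== CLAIM (what is proved, stated in full; the proofs are below) =====
def Claim_equal_word_from_letter : Prop := ∀ (letters : String) (words : String), Dom_word_from_letter letters words → Spec_word_from_letter letters words (word_from_letter letters words)

-- ===== LEMMAS AND PROOFS =====

-- A's loop sums a per-character delta.
theorem pv_foldl_add (g : Char → Int) (ls : List Char) (c : Int) :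
    ls.foldl (fun acc x => acc + g x) c = c + (ls.map g).sum := by
  induction ls generalizing c with
  | nil => simp
  | cons x xs ih => simp [List.foldl, ih]; ring

-- A sum of per-element values each ≤ 1 reaches the length iff every value is 1.
theorem pv_sum_eq_len (g : Char → Int) (ls : List Char) (h : ∀ x ∈ ls, g x ≤ 1) :
    ((ls.map g).sum = (ls.length : Int)) ↔ ∀ x ∈ ls, g x = 1 := by
  induction ls with
  | nil => simp
  | cons x xs ih =>
    have hx := h x (by simp)
    have hxs : ∀ y ∈ xs, g y ≤ 1 := fun y hy => h y (by simp [hy])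
    have hsum : (xs.map g).sum ≤ (xs.length : Int) := by
      clear ih h hx
      induction xs with
      | nil => simp
      | cons z zs ihz =>
        have hz := hxs z (by simp)
        have hzs : (zs.map g).sum ≤ (zs.length : Int) := ihz (fun y hy => hxs y (by simp [hy]))
        simp [List.map, List.sum_cons]
        omega
    constructor
    · intro heq
      have hsplit : g x = 1 ∧ (xs.map g).sum = (xs.length : Int) := by
        simp [List.sum_cons] at heq
        constructor <;> omega
      intro y hy
      rcases List.mem_cons.mp hy with rfl | hy'
      · exact hsplit.1
      · exact (ih hxs).mp hsplit.2 y hy'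
    · intro hall
      have h1 : g x = 1 := hall x (by simp)
      have h2 : (xs.map g).sum = (xs.length : Int) :=
        (ih hxs).mpr (fun y hy => hall y (by simp [hy]))
      simp [List.sum_cons, h1, h2]
      omega

theorem word_from_letter_spec : Claim_equal_word_from_letter := by
  intro letters words _
  unfold Spec_word_from_letter word_from_letter word_from_letter_alt
  set ls := letters.toList with hls
  set ws := words.toList with hws
  -- rewrite the loop body as an additive delta
  set g : Char → Int := fun x => if ws.contains x then
      (if ls.count x = ws.count x then (1 : Int) else 0) else -1 with hg
  have hbody : (fun (count : Int) i =>
      if ws.contains i then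
        if ls.count i == ws.count i then count + 1 else count
      else count - 1)
      = (fun (acc : Int) x => acc + g x) := by
    funext acc x
    by_cases hc : x ∈ ws <;> by_cases he : ls.count x = ws.count x <;>
      simp [hg, hc, he] <;> ring
  have hle : ∀ x ∈ ls, g x ≤ 1 := by
    intro x _; simp only [hg]; split_ifs <;> omega
  have hlen : PySem.Str.len letters = (ls.length : Int) := by
    simp [PySem.Str.len_eq, hls]
  -- the key iff: A's loop condition ↔ per-letter count equality
  have hiff : (∀ x ∈ ls, g x = 1) ↔ ∀ x ∈ ls, ls.count x = ws.count x := by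
    constructor
    · intro h x hx
      have hgx := h x hx
      simp only [hg] at hgx
      by_cases h1 : x ∈ ws
      · by_cases h2 : ls.count x = ws.count x
        · exact h2
        · simp [h1, h2] at hgx
      · simp [h1] at hgx
    · intro h x hx
      have hc := h x hx
      have hpos : 0 < ls.count x := List.count_pos_iff.mpr hx
      have hmem : x ∈ ws := List.count_pos_iff.mp (hc ▸ hpos)
      simp [hg, hc, hmem]
  -- characterize A
  have hA : (ls.foldl (fun (count : Int) i =>
      if ws.contains i then
        if ls.count i == ws.count i then count + 1 else count
      else count - 1) 0 == PySem.Str.len letters)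
      = decide (∀ x ∈ ls, ls.count x = ws.count x) := by
    rw [hbody, pv_foldl_add, hlen, Bool.eq_iff_iff]
    simp only [beq_iff_eq, decide_eq_true_eq, zero_add]
    rw [pv_sum_eq_len g ls hle]
    exact hiff
  rw [show ∀ b : Bool, (if b = true then true else false) = b from fun b => by cases b <;> simp]
  rw [hA]
  -- characterize B directly on the goal
  simp only [PySem.Dict.foldl_insert_getD_add_one_eq_counter, PySem.Dict.keys_counter]
  rw [Bool.eq_iff_iff]
  simp only [List.all_eq_true, PySem.Dict.getD_counter, beq_iff_eq, decide_eq_true_eq,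
    Nat.cast_inj]
  constructor
  · intro h x hx
    exact h x ((PySem.Set.mem_ofList ls x).mp hx)
  · intro h x hx
    exact h x ((PySem.Set.mem_ofList ls x).mpr hx)
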